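-- pv_equiv track=rewrite | github.com/TumanovaNelly/ITMOalgorithms | Lab6/Task7/src/Stones.py | count_index
-- ===== SOURCE A (Python) =====
-- from typing import Dict, List
--
-- def count_index(string: str, beauty: Dict[str, List[str]]):
--     """
--     :param string: строка, обозначающая набор камней
--     :param beauty: упорядоченные пары "красивых" камней: второму элементу сопоставляется список первых элементов
--     :return: количество "красивых" пар в строке
--     """
--     counter = [0 for i in
--                range(ord('a'), ord('z') + 1)]  # текущее количество раз, которое встретилось соответствующее число
--     cnt = 0
--     for sym in string:
--         for first in beauty.get(sym, []):
--             cnt += counter[ord(first) - ord('a')]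
--         counter[ord(sym) - ord('a')] += 1
--
--     return cnt
-- ===== SOURCE B (Python) =====
-- # Mirror decomposition: walk the string right-to-left keeping suffix counts of
-- # "first" stones announced by beauty, accumulating at each stone instead of
-- # A's left-to-right prefix counts accumulated at the "second" stone.
-- def count_index(string, beauty):
--     suffix = [0] * 26
--     cnt = 0
--     for sym in reversed(string):
--         cnt += suffix[ord(sym) - ord('a')]
--         for first in beauty.get(sym, []):
--             suffix[ord(first) - ord('a')] += 1
--     return cnt
-- ===== Notes on version B (the rewrite author's own statement) =====
-- stated objective: alternative
-- what changed: B walks the string right-to-left and maintains suffix counts of the 'first' stones listed by beauty (accumulating at each string position), instead of A's left-to-right walk maintaining prefix counts of the string's own characters (accumulating at the 'second' stone).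
import Mathlib
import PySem

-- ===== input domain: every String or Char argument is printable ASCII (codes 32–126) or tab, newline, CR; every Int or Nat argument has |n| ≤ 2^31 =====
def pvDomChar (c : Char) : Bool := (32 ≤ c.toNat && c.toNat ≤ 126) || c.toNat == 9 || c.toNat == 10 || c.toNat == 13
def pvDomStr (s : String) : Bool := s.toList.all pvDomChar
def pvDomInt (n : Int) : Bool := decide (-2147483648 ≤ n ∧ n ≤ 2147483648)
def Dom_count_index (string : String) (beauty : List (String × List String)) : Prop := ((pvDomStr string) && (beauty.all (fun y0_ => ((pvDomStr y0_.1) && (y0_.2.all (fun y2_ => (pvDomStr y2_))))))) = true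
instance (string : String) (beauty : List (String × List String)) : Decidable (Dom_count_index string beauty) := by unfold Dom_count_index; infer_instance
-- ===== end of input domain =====

-- B mirrors A: a backward walk with suffix counts of the 'first' stones, instead of A's forward walk with prefix counts of the string's characters; same result, same cost.

-- ===== PORT A =====
-- beauty.get(sym, []): dict lookup with default (helper shared by both ports)
def beautyGet (beauty : List (String × List String)) (sym : Char) : List String :=
  (PySem.Dict.get? (PySem.Dict.mk beauty) (String.singleton sym)).getD []

-- ord(first): Python raises TypeError unless first is a single character; such inputs are outside Pre_ (0 is a junk value there).
def pyOrd (f : String) : Int :=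
  match f.toList with
  | [c] => (c.toNat : Int)
  | _ => 0

-- loop body of A: add counter[ord(first)-97] for each first in beauty.get(sym, []), then counter[ord(sym)-97] += 1.
-- counter reads/writes use the total forms pyGetD/pySetD; Pre_ puts every touched index in range (Python raises IndexError outside).
def stepA (beauty : List (String × List String)) (st : List Int × Int) (sym : Char) : List Int × Int :=
  let cnt := (beautyGet beauty sym).foldl
      (fun cnt first => cnt + PySem.List.pyGetD st.1 (pyOrd first - 97) 0) st.2
  (PySem.List.pySetD st.1 ((sym.toNat : Int) - 97)
     (PySem.List.pyGetD st.1 ((sym.toNat : Int) - 97) 0 + 1), cnt)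

def count_index (string : String) (beauty : List (String × List String)) : Int :=
  (string.toList.foldl (stepA beauty)
    ((PySem.List.pyRange 97 123 1).map (fun _ => (0 : Int)), 0)).2

-- ===== PORT B =====
-- loop body of Source B: cnt += suffix[ord(sym)-97], then suffix[ord(first)-97] += 1 for each first in beauty.get(sym, []).
def stepB (beauty : List (String × List String)) (st : List Int × Int) (sym : Char) : List Int × Int :=
  let cnt := st.2 + PySem.List.pyGetD st.1 ((sym.toNat : Int) - 97) 0
  ((beautyGet beauty sym).foldl
      (fun suffix first =>
        PySem.List.pySetD suffix (pyOrd first - 97)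
          (PySem.List.pyGetD suffix (pyOrd first - 97) 0 + 1)) st.1, cnt)

def count_index_alt (string : String) (beauty : List (String × List String)) : Int :=
  (string.toList.reverse.foldl (stepB beauty) (List.replicate 26 (0 : Int), 0)).2

-- ===== PRECONDITION & SPEC =====
-- character whose Python list index ord(c)-97 lands in [-26,25] (negative wraparound included), i.e. no IndexError
def pvOkCharB (c : Char) : Bool := 71 ≤ c.toNat && c.toNat ≤ 122
-- a 'first' entry Python can index with: a single character in range (else TypeError/IndexError)
def pvOkFirstB (f : String) : Bool := f.toList.length == 1 && f.toList.all pvOkCharB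
-- Pre_ excludes exactly: inputs where A raises (a string character, or a 'first' in a beauty entry reachable from the
-- string, outside Python's 26-slot index range — IndexError — or a multi-character 'first' — TypeError), and
-- association lists with duplicate keys, which no Python dict produces (dict construction overwrites; order accidental).
def Pre_count_index (string : String) (beauty : List (String × List String)) : Prop :=
  string.toList.all pvOkCharB = true ∧
  beauty.all (fun p =>
    !(string.toList.any (fun c => p.1 == String.singleton c)) || p.2.all pvOkFirstB) = true ∧
  (beauty.map Prod.fst).Nodup
instance (string : String) (beauty : List (String × List String)) : Decidable (Pre_count_index string beauty) := by
  unfold Pre_count_index; infer_instance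
def pvWitness_count_index : String × (List (String × List String)) := ("ab", [])
def Spec_count_index (string : String) (beauty : List (String × List String)) (out : Int) : Prop := out = count_index_alt string beauty
instance (string : String) (beauty : List (String × List String)) (out : Int) : Decidable (Spec_count_index string beauty out) := by unfold Spec_count_index; infer_instance

-- ===== CLAIM (what is proved, stated in full; the proofs are below) =====
def Claim_equal_count_index : Prop := ∀ (string : String) (beauty : List (String × List String)), Dom_count_index string beauty → Pre_count_index string beauty → Spec_count_index string beauty (count_index string beauty)

-- ===== LEMMAS AND PROOFS =====

-- Prop forms of the precondition's checks, convenient for the proofs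
def pvOkChar (c : Char) : Prop := 71 ≤ c.toNat ∧ c.toNat ≤ 122

def pvOkFirst (f : String) : Prop := f.toList.length = 1 ∧ ∀ c ∈ f.toList, pvOkChar c

theorem okCharB_iff (c : Char) : pvOkCharB c = true ↔ pvOkChar c := by
  simp [pvOkCharB, pvOkChar]

theorem okFirstB_iff (f : String) : pvOkFirstB f = true ↔ pvOkFirst f := by
  simp [pvOkFirstB, pvOkFirst, List.all_eq_true, okCharB_iff]

-- the (wrapped) 26-slot index a valid character lands in
def idxC (c : Char) : Nat := if 97 ≤ c.toNat then c.toNat - 97 else c.toNat - 71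

-- the slot of a valid 'first'
def idxS (f : String) : Nat :=
  match f.toList with
  | [c] => idxC c
  | _ => 0

-- total weight of slot k over the characters of s
def Wk (beauty : List (String × List String)) (k : Nat) (s : List Char) : Int :=
  (s.map (fun c => (((beautyGet beauty c).filter (fun f => idxS f == k)).length : Int))).sum

-- the pair count both programs compute
def P (beauty : List (String × List String)) : List Char → Int
  | [] => 0
  | x :: rest => P beauty rest + Wk beauty (idxC x) rest

theorem idxC_lt (c : Char) (hc : pvOkChar c) : idxC c < 26 := by
  obtain ⟨h1, h2⟩ := hc; unfold idxC; split <;> omega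

theorem idxS_lt (f : String) (hf : pvOkFirst f) : idxS f < 26 := by
  obtain ⟨h1, h2⟩ := hf
  unfold idxS
  match hfl : f.toList with
  | [c] => exact idxC_lt c (h2 c (by rw [hfl]; simp))
  | [] => simp [hfl] at h1
  | a :: b :: r => simp [hfl] at h1

theorem pyGetD_valid (tbl : List Int) (c : Char) (hc : pvOkChar c) (hl : tbl.length = 26) :
    PySem.List.pyGetD tbl ((c.toNat : Int) - 97) 0 = tbl.getD (idxC c) 0 := by
  obtain ⟨h1, h2⟩ := hc
  by_cases h : 97 ≤ c.toNat
  · rw [PySem.List.pyGetD_eq_getElem tbl 0 (by omega) (by omega)]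
    rw [List.getD_eq_getElem _ _ (by simp [idxC, h]; omega)]
    congr 1
    simp [idxC, h]; omega
  · have hk : ((c.toNat : Int) - 97) = -(((97 - c.toNat : Nat) : Int)) := by omega
    rw [hk, PySem.List.pyGetD_neg_natCast tbl _ 0 (by omega) (by omega)]
    rw [List.getD_eq_getElem _ _ (by simp [idxC, h]; omega)]
    congr 1
    simp [idxC, h]; omega

theorem pySetD_valid (tbl : List Int) (c : Char) (v : Int) (hc : pvOkChar c) (hl : tbl.length = 26) :
    PySem.List.pySetD tbl ((c.toNat : Int) - 97) v = tbl.set (idxC c) v := by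
  obtain ⟨h1, h2⟩ := hc
  by_cases h : 97 ≤ c.toNat
  · rw [PySem.List.pySetD_of_nonneg tbl v (by omega)]
    congr 1
    simp [idxC, h]; omega
  · simp only [PySem.List.pySetD, PySem.List.pySet?, PySem.List.pyIdx?, hl]
    rw [if_neg (by omega), if_pos (by omega)]
    simp only [Option.map_some, Option.getD_some]
    congr 1
    simp [idxC, h]; omega

theorem pyGetD_first (tbl : List Int) (f : String) (hf : pvOkFirst f) (hl : tbl.length = 26) :
    PySem.List.pyGetD tbl (pyOrd f - 97) 0 = tbl.getD (idxS f) 0 := by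
  obtain ⟨h1, h2⟩ := hf
  match hfl : f.toList with
  | [c] =>
    have hc := h2 c (by rw [hfl]; simp)
    simpa [pyOrd, idxS, hfl] using pyGetD_valid tbl c hc hl
  | [] => simp [hfl] at h1
  | a :: b :: r => simp [hfl] at h1

theorem pySetD_first (tbl : List Int) (f : String) (v : Int) (hf : pvOkFirst f) (hl : tbl.length = 26) :
    PySem.List.pySetD tbl (pyOrd f - 97) v = tbl.set (idxS f) v := by
  obtain ⟨h1, h2⟩ := hf
  match hfl : f.toList with
  | [c] =>
    have hc := h2 c (by rw [hfl]; simp)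
    simpa [pyOrd, idxS, hfl] using pySetD_valid tbl c v hc hl
  | [] => simp [hfl] at h1
  | a :: b :: r => simp [hfl] at h1

theorem getD_set_valid (tbl : List Int) (j k : Nat) (v : Int) (hk : k < tbl.length) :
    (tbl.set k v).getD j 0 = if j = k then v else tbl.getD j 0 := by
  by_cases h : j = k
  · subst h
    simp [List.getD, hk]
  · simp [h, List.getD, List.getElem?_set_ne (by omega : k ≠ j)]

theorem sum_map_add {α : Type} (L : List α) (f g : α → Int) :
    (L.map (fun x => f x + g x)).sum = (L.map f).sum + (L.map g).sum := by
  induction L with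
  | nil => simp
  | cons a L ih => simp [ih]; ring

theorem sum_map_ite {α : Type} (p : α → Bool) (L : List α) :
    (L.map (fun f => if p f then (1 : Int) else 0)).sum = ((L.filter p).length : Int) := by
  induction L with
  | nil => simp
  | cons a L ih =>
    by_cases h : p a
    · simp [h, ih]; ring
    · simp [h, ih]

theorem getD_replicate_zero (j : Nat) : (List.replicate 26 (0 : Int)).getD j 0 = 0 := by
  unfold List.getD
  rw [List.getElem?_replicate]
  split <;> rfl

-- validity of every 'first' reachable from the string, from Pre_
theorem FsOk (string : String) (beauty : List (String × List String))
    (hpre : Pre_count_index string beauty) (c : Char) (hc : c ∈ string.toList) :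
    ∀ f ∈ beautyGet beauty c, pvOkFirst f := by
  unfold beautyGet
  cases h : PySem.Dict.get? (PySem.Dict.mk beauty) (String.singleton c) with
  | none => simp
  | some v =>
    intro f hf
    have hmem : (String.singleton c, v) ∈ (PySem.Dict.mk beauty).items :=
      PySem.Dict.mem_items_of_get?_eq_some (PySem.Dict.mk beauty) h
    have hb := List.all_eq_true.mp hpre.2.1 (String.singleton c, v) hmem
    rw [Bool.or_eq_true, Bool.not_eq_true'] at hb
    rcases hb with hb | hb
    · have : string.toList.any (fun c' => (String.singleton c, v).1 == String.singleton c') = true :=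
        List.any_eq_true.mpr ⟨c, hc, by exact beq_self_eq_true _⟩
      rw [hb] at this
      exact absurd this (by simp)
    · exact (okFirstB_iff f).mp (List.all_eq_true.mp hb f (by simpa using hf))

-- A's inner loop: accumulate reads over the fixed counter
theorem innerA (tbl : List Int) (hl : tbl.length = 26) (L : List String)
    (hf : ∀ f ∈ L, pvOkFirst f) (cnt : Int) :
    L.foldl (fun cnt f => cnt + PySem.List.pyGetD tbl (pyOrd f - 97) 0) cnt
      = cnt + (L.map (fun f => tbl.getD (idxS f) 0)).sum := by
  induction L generalizing cnt with
  | nil => simp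
  | cons a L ih =>
    rw [List.foldl_cons, pyGetD_first tbl a (hf a (by simp)) hl,
        ih (fun f h => hf f (by simp [h]))]
    simp; ring

-- B's inner loop: length is preserved
theorem innerB_len (L : List String) (tbl : List Int) :
    (L.foldl (fun t f =>
        PySem.List.pySetD t (pyOrd f - 97) (PySem.List.pyGetD t (pyOrd f - 97) 0 + 1)) tbl).length
      = tbl.length := by
  induction L generalizing tbl with
  | nil => simp
  | cons a L ih =>
    rw [List.foldl_cons, ih]
    simp [PySem.List.length_pySetD]

-- B's inner loop: each slot gains the number of firsts landing in it
theorem innerB_getD (L : List String) (hf : ∀ f ∈ L, pvOkFirst f) (tbl : List Int)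
    (hl : tbl.length = 26) (k : Nat) (_hk : k < 26) :
    (L.foldl (fun t f =>
        PySem.List.pySetD t (pyOrd f - 97) (PySem.List.pyGetD t (pyOrd f - 97) 0 + 1)) tbl).getD k 0
      = tbl.getD k 0 + ((L.filter (fun f => idxS f == k)).length : Int) := by
  induction L generalizing tbl with
  | nil => simp
  | cons a L ih =>
    have ha := hf a (by simp)
    rw [List.foldl_cons, pyGetD_first tbl a ha hl, pySetD_first tbl a _ ha hl,
        ih (fun f h => hf f (by simp [h])) _ (by simp [hl])]
    rw [getD_set_valid tbl k (idxS a) _ (by rw [hl]; exact idxS_lt a ha)]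
    by_cases h : idxS a = k
    · simp [h]; ring
    · simp [h, Ne.symm h]

-- A's main loop invariant
theorem mainA (beauty : List (String × List String)) (s : List Char)
    (hs : ∀ c ∈ s, pvOkChar c) (hf : ∀ c ∈ s, ∀ f ∈ beautyGet beauty c, pvOkFirst f)
    (tbl : List Int) (hl : tbl.length = 26) (cnt : Int) :
    (s.foldl (stepA beauty) (tbl, cnt)).2
      = cnt + (s.map (fun c => ((beautyGet beauty c).map (fun f => tbl.getD (idxS f) 0)).sum)).sum
          + P beauty s := by
  induction s generalizing tbl cnt with
  | nil => simp [P]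
  | cons x rest ih =>
    have hx : pvOkChar x := hs x (by simp)
    have hfx := hf x (by simp)
    have hstep : stepA beauty (tbl, cnt) x
        = (tbl.set (idxC x) (tbl.getD (idxC x) 0 + 1),
           cnt + ((beautyGet beauty x).map (fun f => tbl.getD (idxS f) 0)).sum) := by
      unfold stepA
      dsimp only
      rw [innerA tbl hl (beautyGet beauty x) hfx cnt, pyGetD_valid tbl x hx hl,
          pySetD_valid tbl x _ hx hl]
    rw [List.foldl_cons, hstep,
        ih (fun c h => hs c (by simp [h])) (fun c h => hf c (by simp [h])) _ (by simp [hl]) _]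
    have hpoint : ∀ c ∈ rest,
        ((beautyGet beauty c).map (fun f => (tbl.set (idxC x) (tbl.getD (idxC x) 0 + 1)).getD (idxS f) 0)).sum
          = ((beautyGet beauty c).map (fun f => tbl.getD (idxS f) 0)).sum
            + (((beautyGet beauty c).filter (fun f => idxS f == idxC x)).length : Int) := by
      intro c hc
      have hmc : (beautyGet beauty c).map (fun f => (tbl.set (idxC x) (tbl.getD (idxC x) 0 + 1)).getD (idxS f) 0)
          = (beautyGet beauty c).map (fun f => tbl.getD (idxS f) 0 + (if idxS f == idxC x then (1:Int) else 0)) := by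
        apply List.map_congr_left
        intro f hfm
        rw [getD_set_valid tbl (idxS f) (idxC x) _ (by rw [hl]; exact idxC_lt x hx)]
        by_cases h : idxS f = idxC x
        · simp [h]
        · simp [h]
      rw [hmc, sum_map_add, sum_map_ite]
    have hsum : (rest.map (fun c =>
          ((beautyGet beauty c).map (fun f => (tbl.set (idxC x) (tbl.getD (idxC x) 0 + 1)).getD (idxS f) 0)).sum)).sum
        = (rest.map (fun c => ((beautyGet beauty c).map (fun f => tbl.getD (idxS f) 0)).sum)).sum
          + Wk beauty (idxC x) rest := by
      rw [List.map_congr_left hpoint, sum_map_add]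
      rfl
    rw [hsum]
    simp only [List.map_cons, List.sum_cons, P]
    ring

-- B's main loop invariant (B folds from the right)
theorem mainB (beauty : List (String × List String)) (s : List Char)
    (hs : ∀ c ∈ s, pvOkChar c) (hf : ∀ c ∈ s, ∀ f ∈ beautyGet beauty c, pvOkFirst f) :
    (s.foldr (fun x st => stepB beauty st x) (List.replicate 26 (0 : Int), 0)).1.length = 26
    ∧ (∀ k < 26, (s.foldr (fun x st => stepB beauty st x) (List.replicate 26 (0 : Int), 0)).1.getD k 0
          = Wk beauty k s)
    ∧ (s.foldr (fun x st => stepB beauty st x) (List.replicate 26 (0 : Int), 0)).2 = P beauty s := by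
  induction s with
  | nil =>
    refine ⟨by simp, fun k _hk => ?_, by simp [P]⟩
    simp only [List.foldr_nil]
    rw [getD_replicate_zero]
    simp [Wk]
  | cons x rest ih =>
    obtain ⟨hlr, hgr, hpr⟩ := ih (fun c h => hs c (by simp [h])) (fun c h => hf c (by simp [h]))
    have hx : pvOkChar x := hs x (by simp)
    have hfx := hf x (by simp)
    rw [List.foldr_cons]
    set r := List.foldr (fun x st => stepB beauty st x) (List.replicate 26 (0 : Int), 0) rest with hr
    refine ⟨?_, fun k hk => ?_, ?_⟩
    · unfold stepB
      dsimp only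
      rw [innerB_len]
      exact hlr
    · unfold stepB
      dsimp only
      rw [innerB_getD (beautyGet beauty x) hfx _ hlr k hk, hgr k hk]
      simp only [Wk, List.map_cons, List.sum_cons]
      ring
    · unfold stepB
      dsimp only
      rw [pyGetD_valid _ x hx hlr, hgr (idxC x) (idxC_lt x hx), hpr]
      simp [P]

-- ===== VERDICT (by name: the statement is the Claim_ definition above) =====
theorem count_index_spec : Claim_equal_count_index := by
  intro string beauty _hdom hpre
  unfold Spec_count_index count_index count_index_alt
  have hs : ∀ c ∈ string.toList, pvOkChar c := fun c hc =>
    (okCharB_iff c).mp (List.all_eq_true.mp hpre.1 c hc)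
  have hf := FsOk string beauty hpre
  have hinit : (PySem.List.pyRange 97 123 1).map (fun _ => (0 : Int)) = List.replicate 26 0 := by
    decide
  rw [hinit, mainA beauty string.toList hs hf _ (by simp) 0]
  have hz : (string.toList.map
      (fun c => ((beautyGet beauty c).map (fun f => (List.replicate 26 (0:Int)).getD (idxS f) 0)).sum)).sum = 0 := by
    have : ∀ c ∈ string.toList,
        ((beautyGet beauty c).map (fun f => (List.replicate 26 (0:Int)).getD (idxS f) 0)).sum = 0 := by
      intro c _
      have : (beautyGet beauty c).map (fun f => (List.replicate 26 (0:Int)).getD (idxS f) 0)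
          = (beautyGet beauty c).map (fun _ => (0:Int)) := by
        apply List.map_congr_left
        intro f _
        exact getD_replicate_zero (idxS f)
      rw [this]
      simp
    rw [List.map_congr_left this]
    simp
  rw [hz, List.foldl_reverse]
  have := (mainB beauty string.toList hs hf).2.2
  rw [this]
  ring
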